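-- pv_equiv track=rewrite | github.com/JarradWalters/pythonCourseProjects | BlackJackDay11.py | getMinValue
-- ===== SOURCE A (Python) =====
-- def getMinValue(hand):
--   total_value = 0
--   for val in hand:
--     if val != 11:
--       total_value += val
--     else:
--       total_value += 1
--   return total_value
-- ===== SOURCE B (Python) =====
-- def getMinValue(hand):
--   return sum(hand) - 10 * hand.count(11)
-- ===== Notes on version B (the rewrite author's own statement) =====
-- stated objective: simpler
-- what changed: Replaces the per-element branching accumulation with a closed-form expression: total sum minus 10 per ace (11), eliminating the conditional entirely.
import Mathlib
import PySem

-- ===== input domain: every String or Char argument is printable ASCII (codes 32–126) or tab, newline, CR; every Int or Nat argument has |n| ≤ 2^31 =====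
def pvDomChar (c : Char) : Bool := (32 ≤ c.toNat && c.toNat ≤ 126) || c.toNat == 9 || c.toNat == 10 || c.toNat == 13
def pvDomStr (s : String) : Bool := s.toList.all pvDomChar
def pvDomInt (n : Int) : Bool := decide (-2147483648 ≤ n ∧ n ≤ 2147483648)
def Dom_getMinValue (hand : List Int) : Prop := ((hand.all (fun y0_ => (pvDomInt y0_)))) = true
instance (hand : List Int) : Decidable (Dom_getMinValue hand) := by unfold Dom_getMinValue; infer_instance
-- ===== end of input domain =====

-- B replaces A's per-element branch by the closed form sum(hand) - 10*count(11); objective: simpler.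

-- ===== PORT A =====
def getMinValue (hand : List Int) : Int :=
  hand.foldl (fun total_value val => if val ≠ 11 then total_value + val else total_value + 1) 0

-- ===== PORT B =====
def getMinValue_alt (hand : List Int) : Int :=
  hand.sum - 10 * PySem.List.count hand 11

-- ===== PRECONDITION & SPEC =====
def Spec_getMinValue (hand : List Int) (out : Int) : Prop := out = getMinValue_alt hand
instance (hand : List Int) (out : Int) : Decidable (Spec_getMinValue hand out) := by unfold Spec_getMinValue; infer_instance

-- ===== CLAIM (what is proved, stated in full; the proofs are below) =====
def Claim_equal_getMinValue : Prop := ∀ (hand : List Int), Dom_getMinValue hand → Spec_getMinValue hand (getMinValue hand)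

-- ===== LEMMAS AND PROOFS =====
theorem getMinValue_foldl_shift (hand : List Int) (acc : Int) :
    hand.foldl (fun total_value val => if val ≠ 11 then total_value + val else total_value + 1) acc
      = acc + hand.sum - 10 * PySem.List.count hand 11 := by
  induction hand generalizing acc with
  | nil => simp [PySem.List.count]
  | cons x xs ih =>
    rw [List.foldl_cons, ih]
    by_cases h : x = 11
    · subst h
      simp [PySem.List.count]
      ring
    · simp [PySem.List.count, h]
      ring

-- ===== VERDICT (by name: the statement is the Claim_ definition above) =====
theorem getMinValue_spec : Claim_equal_getMinValue := by
  intro hand _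
  unfold Spec_getMinValue getMinValue getMinValue_alt
  rw [getMinValue_foldl_shift]
  ring
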